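-- pv_equiv track=rewrite | github.com/Chafalleiro/ETail | plugins/data_extractor_plugin.py | _get_group_type
-- ===== SOURCE A (Python) =====
-- def _get_group_type(group):
--     """Return the type of the group: 'literal' if all fields are literal, otherwise the pattern type of the first non-literal field."""
--     if any(cfg['pattern_type'] != 'literal' for cfg in group):
--         # It's a pattern group, now check if it's text pattern
--         # We consider it a text pattern group if any field in the group is of type "text"
--         if any(cfg['pattern_type'] == 'text' for cfg in group):
--             return 'text'
--         else:
--             return 'other_pattern'
--     else:
--         return 'literal'
-- ===== SOURCE B (Python) =====
-- def _get_group_type(group):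
--     """Return the type of the group: 'literal' if all fields are literal, otherwise the pattern type of the first non-literal field."""
--     rank = 0
--     for cfg in group:
--         t = cfg['pattern_type']
--         rank = max(rank, 2 if t == 'text' else (0 if t == 'literal' else 1))
--     return ('literal', 'other_pattern', 'text')[rank]
-- ===== Notes on version B (the rewrite author's own statement) =====
-- stated objective: alternative
-- what changed: B replaces A's two short-circuiting boolean scans with a single fold computing the maximum numeric severity rank (literal=0, other pattern=1, text=2) and indexes a result table by that rank.
-- outside the precondition, e.g. on _get_group_type([{'pattern_type': 'text'}, {}]): A returns 'text', B raises KeyError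
import Mathlib
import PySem

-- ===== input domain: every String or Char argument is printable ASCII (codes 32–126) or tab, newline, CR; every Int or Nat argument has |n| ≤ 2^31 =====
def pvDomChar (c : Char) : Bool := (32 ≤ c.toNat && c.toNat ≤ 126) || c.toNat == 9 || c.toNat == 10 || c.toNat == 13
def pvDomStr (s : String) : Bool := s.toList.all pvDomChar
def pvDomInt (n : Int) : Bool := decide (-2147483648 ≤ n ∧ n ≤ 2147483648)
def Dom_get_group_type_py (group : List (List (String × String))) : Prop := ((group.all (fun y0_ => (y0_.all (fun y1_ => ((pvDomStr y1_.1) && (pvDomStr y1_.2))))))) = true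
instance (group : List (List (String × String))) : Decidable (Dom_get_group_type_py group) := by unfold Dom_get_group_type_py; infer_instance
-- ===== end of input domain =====

-- B folds the group into one maximum severity rank (literal=0, other pattern=1, text=2) and indexes
-- a result table; A makes two short-circuiting boolean scans. Return-value equivalence only; both pure.

-- ===== PORT A =====
-- cfg['pattern_type'] (total form; Pre_ guarantees the key is present, so getD's default is never used inside Pre_)
def pvPT (cfg : List (String × String)) : String :=
  PySem.Dict.getD (PySem.Dict.mk cfg) "pattern_type" ""

def get_group_type_py (group : List (List (String × String))) : String :=
  if group.any (fun cfg => pvPT cfg != "literal") then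
    if group.any (fun cfg => pvPT cfg == "text") then "text" else "other_pattern"
  else "literal"

-- ===== PORT B =====
-- severity rank of one field's pattern type
def pvRank (t : String) : Nat := if t == "text" then 2 else if t == "literal" then 0 else 1

def get_group_type_py_alt (group : List (List (String × String))) : String :=
  let rank := group.foldl (fun r cfg => max r (pvRank (pvPT cfg))) 0
  -- Python tuple indexing; rank ≤ 2 always, so the in-range getD is exact
  (["literal", "other_pattern", "text"]).getD rank ""

-- ===== PRECONDITION & SPEC =====
-- Pre_ excludes groups containing a dict without the key 'pattern_type': A raises KeyError there unless its
-- short-circuiting scans stop before reaching the malformed dict (then A returns while B, which reads every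
-- dict, raises KeyError) — an accident of scan order no caller would rely on.
def Pre_get_group_type_py (group : List (List (String × String))) : Prop :=
  (group.all (fun cfg => cfg.any (fun p => p.1 == "pattern_type"))) = true
instance (group : List (List (String × String))) : Decidable (Pre_get_group_type_py group) := by
  unfold Pre_get_group_type_py; infer_instance

def pvWitness_get_group_type_py : (List (List (String × String))) :=
  [[("pattern_type", "text")], [("pattern_type", "literal")]]

def Spec_get_group_type_py (group : List (List (String × String))) (out : String) : Prop := out = get_group_type_py_alt group
instance (group : List (List (String × String))) (out : String) : Decidable (Spec_get_group_type_py group out) := by unfold Spec_get_group_type_py; infer_instance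

-- ===== CLAIM (what is proved, stated in full; the proofs are below) =====
def Claim_equal_get_group_type_py : Prop := ∀ (group : List (List (String × String))), Dom_get_group_type_py group → Pre_get_group_type_py group → Spec_get_group_type_py group (get_group_type_py group)

-- ===== LEMMAS AND PROOFS =====

-- the fold with an arbitrary start value
theorem pvFold_init (group : List (List (String × String))) (a : Nat) :
    group.foldl (fun r cfg => max r (pvRank (pvPT cfg))) a
      = max a (group.foldl (fun r cfg => max r (pvRank (pvPT cfg))) 0) := by
  induction group generalizing a with
  | nil => simp
  | cons cfg rest ih =>
    simp only [List.foldl_cons]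
    rw [ih (max a _), ih (max 0 _)]
    omega

theorem pvFold_le (group : List (List (String × String))) :
    group.foldl (fun r cfg => max r (pvRank (pvPT cfg))) 0 ≤ 2 := by
  induction group with
  | nil => simp
  | cons cfg rest ih =>
    simp only [List.foldl_cons]
    rw [pvFold_init]
    have : pvRank (pvPT cfg) ≤ 2 := by unfold pvRank; split_ifs <;> omega
    omega

theorem pvFold_mem_le (group : List (List (String × String))) (cfg : List (String × String))
    (h : cfg ∈ group) :
    pvRank (pvPT cfg) ≤ group.foldl (fun r c => max r (pvRank (pvPT c))) 0 := by
  induction group with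
  | nil => simp at h
  | cons c rest ih =>
    simp only [List.foldl_cons]
    rw [pvFold_init]
    rcases List.mem_cons.1 h with rfl | h'
    · omega
    · have := ih h'; omega

theorem pvFold_all_zero (group : List (List (String × String)))
    (h : ∀ cfg ∈ group, pvPT cfg = "literal") :
    group.foldl (fun r cfg => max r (pvRank (pvPT cfg))) 0 = 0 := by
  induction group with
  | nil => rfl
  | cons c rest ih =>
    simp only [List.foldl_cons]
    rw [pvFold_init]
    have hc : pvRank (pvPT c) = 0 := by
      rw [h c (List.mem_cons_self)]; rfl
    have := ih (fun cfg hm => h cfg (List.mem_cons_of_mem _ hm))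
    omega

theorem pvFold_two_exists (group : List (List (String × String)))
    (h : group.foldl (fun r cfg => max r (pvRank (pvPT cfg))) 0 = 2) :
    ∃ cfg ∈ group, pvPT cfg = "text" := by
  induction group with
  | nil => simp at h
  | cons c rest ih =>
    simp only [List.foldl_cons] at h
    rw [pvFold_init] at h
    by_cases hc : pvPT c = "text"
    · exact ⟨c, List.mem_cons_self, hc⟩
    · have hr : pvRank (pvPT c) ≤ 1 := by
        unfold pvRank; split_ifs with h1 h2
        · exact absurd (by simpa using h1) hc
        · omega
        · omega
      have hrest : rest.foldl (fun r cfg => max r (pvRank (pvPT cfg))) 0 = 2 := by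
        have := pvFold_le rest; omega
      obtain ⟨cfg, hm, ht⟩ := ih hrest
      exact ⟨cfg, List.mem_cons_of_mem _ hm, ht⟩

-- ===== VERDICT (by name: the statement is the Claim_ definition above) =====
theorem get_group_type_py_spec : Claim_equal_get_group_type_py := by
  intro group _ _
  unfold Spec_get_group_type_py get_group_type_py get_group_type_py_alt
  set F := group.foldl (fun r cfg => max r (pvRank (pvPT cfg))) 0 with hF
  by_cases hall : ∀ cfg ∈ group, pvPT cfg = "literal"
  · have hA : group.any (fun cfg => pvPT cfg != "literal") = false := by
      simp only [List.any_eq_false]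
      intro cfg hc; simp [hall cfg hc]
    have hB : F = 0 := pvFold_all_zero group hall
    simp [hA, hB]
  · push Not at hall
    obtain ⟨c0, hc0, hne0⟩ := hall
    have hA : group.any (fun cfg => pvPT cfg != "literal") = true :=
      List.any_eq_true.2 ⟨c0, hc0, by simpa using hne0⟩
    have hF1 : 1 ≤ F := by
      have h1 : 1 ≤ pvRank (pvPT c0) := by
        unfold pvRank; split_ifs with h1 h2
        · omega
        · exact absurd (by simpa using h2) hne0
        · omega
      have := pvFold_mem_le group c0 hc0
      omega
    by_cases ht : ∃ cfg ∈ group, pvPT cfg = "text"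
    · obtain ⟨c1, hc1, htx⟩ := ht
      have h2 : group.any (fun cfg => pvPT cfg == "text") = true :=
        List.any_eq_true.2 ⟨c1, hc1, by simpa using htx⟩
      have hB : F = 2 := by
        have hle := pvFold_le group
        have hm := pvFold_mem_le group c1 hc1
        rw [← hF] at hm
        have hr2 : pvRank (pvPT c1) = 2 := by rw [htx]; rfl
        omega
      simp [hA, h2, hB]
    · have h2 : group.any (fun cfg => pvPT cfg == "text") = false := by
        simp only [List.any_eq_false]
        intro cfg hc
        simp only [beq_iff_eq]
        exact fun h => ht ⟨cfg, hc, h⟩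
      have hB : F = 1 := by
        have hle := pvFold_le group
        have h2F : F ≠ 2 := fun h => ht (pvFold_two_exists group (hF ▸ h))
        omega
      simp [hA, h2, hB]
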